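-- pv_equiv track=rewrite | github.com/Afia-Zaman/Project-7_X-Y_-_Xena | Project07_Afia_Zaman.py | draw_x
-- ===== SOURCE A (Python) =====
-- def draw_x(symbol, size):
--     bounds = size * 2 + 1
--     x = ""
--     for row in range(size + 1):
--         for col in range(bounds):
--             if row == col or col == bounds - row - 1:
--                 x += symbol
--             else:
--                 x += " "
--         x += "\n"
--     for row in range(size + 1, bounds):
--         for col in range(bounds):
--             if row == col or col == bounds - row - 1:
--                 x += symbol
--             else:
--                 x += " "
--         x += "\n"
--     return x
-- ===== SOURCE B (Python) =====
-- def draw_x(symbol, size):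
--     bounds = size * 2 + 1
--     rows = []
--     for row in range(bounds):
--         cells = [" "] * bounds
--         cells[row] = symbol
--         cells[bounds - row - 1] = symbol
--         rows.append("".join(cells) + "\n")
--     return "".join(rows)
-- ===== Notes on version B (the rewrite author's own statement) =====
-- stated objective: simpler
-- what changed: B computes the two symbol columns per row and writes them directly into a preallocated list of spaces joined once, in a single loop over all rows, instead of A's two separate row loops each scanning every column with an equality branch.
import Mathlib
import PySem

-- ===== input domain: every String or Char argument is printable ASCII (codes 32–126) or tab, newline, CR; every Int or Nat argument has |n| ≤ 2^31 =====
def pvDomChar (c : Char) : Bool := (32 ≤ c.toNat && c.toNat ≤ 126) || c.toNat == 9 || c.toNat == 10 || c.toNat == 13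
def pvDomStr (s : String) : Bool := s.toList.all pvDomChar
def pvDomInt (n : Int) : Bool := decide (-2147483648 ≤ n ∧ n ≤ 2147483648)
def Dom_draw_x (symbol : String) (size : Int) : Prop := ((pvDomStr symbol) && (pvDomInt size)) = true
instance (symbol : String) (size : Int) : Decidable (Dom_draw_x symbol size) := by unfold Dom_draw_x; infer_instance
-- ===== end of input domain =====

-- B replaces A's two column-scanning row loops by one loop that writes the symbol
-- directly at its two computed columns in a preallocated row of spaces (objective: simpler).

-- ===== PORT A =====
-- the row loop body A repeats twice: for each row, scan every column, appending symbol or " "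
def drawXPass (symbol : List Char) (bounds : Int) (rows : List Int) (x : List Char) : List Char :=
  rows.foldl (fun x row =>
    ((PySem.List.pyRange 0 bounds 1).foldl (fun x col =>
      if row == col || col == bounds - row - 1 then x ++ symbol else x ++ [' ']) x) ++ ['\n']) x

def draw_x (symbol : String) (size : Int) : String :=
  let bounds := size * 2 + 1
  let x : List Char := []
  let x := drawXPass symbol.toList bounds (PySem.List.pyRange 0 (size + 1) 1) x
  let x := drawXPass symbol.toList bounds (PySem.List.pyRange (size + 1) bounds 1) x
  String.ofList x

-- ===== PORT B =====
-- cells[row] = symbol / cells[bounds-row-1] = symbol: inside the loop 0 ≤ row < bounds and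
-- 0 ≤ bounds-row-1 < bounds, so .toNat/List.set is exactly Python's in-range list assignment
def draw_x_alt (symbol : String) (size : Int) : String :=
  let bounds := size * 2 + 1
  let rows : List (List Char) := (PySem.List.pyRange 0 bounds 1).foldl (fun rows row =>
    let cells := (List.replicate bounds.toNat ([' '] : List Char)).set row.toNat symbol.toList
    let cells := cells.set (bounds - row - 1).toNat symbol.toList
    rows ++ [PySem.Chars.join [] cells ++ ['\n']]) []
  String.ofList (PySem.Chars.join [] rows)

-- ===== PRECONDITION & SPEC =====
def Spec_draw_x (symbol : String) (size : Int) (out : String) : Prop := out = draw_x_alt symbol size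
instance (symbol : String) (size : Int) (out : String) : Decidable (Spec_draw_x symbol size out) := by unfold Spec_draw_x; infer_instance

-- ===== CLAIM (what is proved, stated in full; the proofs are below) =====
def Claim_equal_draw_x : Prop := ∀ (symbol : String) (size : Int), Dom_draw_x symbol size → Spec_draw_x symbol size (draw_x symbol size)

-- ===== LEMMAS AND PROOFS =====

theorem join_nil_eq_flatten (xs : List (List Char)) : PySem.Chars.join [] xs = xs.flatten := by
  simp only [PySem.Chars.join]
  induction xs with
  | nil => simp [List.intercalate]
  | cons h t ih => cases t <;> simp_all [List.intercalate, List.intersperse]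

-- the column content of one row, as A computes it
def rowChars (symbol : List Char) (bounds row : Int) : List Char :=
  (PySem.List.pyRange 0 bounds 1).flatMap
    (fun col => if row == col || col == bounds - row - 1 then symbol else [' '])

theorem inner_loop_eq (symbol : List Char) (bounds row : Int) (x : List Char) :
    (PySem.List.pyRange 0 bounds 1).foldl (fun x col =>
      if row == col || col == bounds - row - 1 then x ++ symbol else x ++ [' ']) x
    = x ++ rowChars symbol bounds row := by
  refine Eq.trans (PySem.List.foldl_congr_mem _ _
      (fun x col => x ++ (if row == col || col == bounds - row - 1 then symbol else [' '])) _
      (by intro acc c _; dsimp only; split <;> rfl)) ?_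
  exact PySem.List.foldl_append_eq_flatMap _ _ _

theorem drawXPass_eq (symbol : List Char) (bounds : Int) (rows : List Int) (x : List Char) :
    drawXPass symbol bounds rows x
    = x ++ rows.flatMap (fun row => rowChars symbol bounds row ++ ['\n']) := by
  unfold drawXPass
  refine Eq.trans (PySem.List.foldl_congr_mem _ _
      (fun x row => x ++ (rowChars symbol bounds row ++ ['\n'])) _
      (by intro acc r _; rw [inner_loop_eq]; simp)) ?_
  exact PySem.List.foldl_append_eq_flatMap _ _ _

-- direct placement builds the same row as A's column scan
theorem cells_eq_row (symbol : List Char) (bounds row : Int)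
    (h0 : 0 ≤ row) (h1 : row < bounds) :
    ((List.replicate bounds.toNat ([' '] : List Char)).set row.toNat symbol).set
      (bounds - row - 1).toNat symbol
    = (PySem.List.pyRange 0 bounds 1).map
        (fun col => if row == col || col == bounds - row - 1 then symbol else [' ']) := by
  apply List.ext_getElem
  · simp [PySem.List.length_pyRange_one]
  · intro k hk hk'
    simp only [List.length_set, List.length_replicate] at hk
    simp only [List.getElem_set, List.getElem_map, List.getElem_replicate,
      PySem.List.getElem_pyRange_one, zero_add]
    by_cases hB : (k : Int) = bounds - row - 1
    · have : (bounds - row - 1).toNat = k := by omega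
      simp [this, hB]
    · have h2 : ¬ (bounds - row - 1).toNat = k := by omega
      by_cases hA : row = (k : Int)
      · simp [hA]
      · have h3 : ¬ row.toNat = k := by omega
        simp [h3, hA, hB]
        intro h
        exact absurd (by omega : (k : Int) = bounds - row - 1) hB

theorem alt_eq (symbol : String) (size : Int) :
    draw_x_alt symbol size
    = String.ofList ((PySem.List.pyRange 0 (size * 2 + 1) 1).flatMap
        (fun row => rowChars symbol.toList (size * 2 + 1) row ++ ['\n'])) := by
  unfold draw_x_alt
  simp only []
  refine congrArg String.ofList (Eq.trans (congrArg (PySem.Chars.join [])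
    (PySem.List.foldl_congr_mem _ _
      (fun rows row => rows ++ [rowChars symbol.toList (size * 2 + 1) row ++ ['\n']]) []
      (by
        intro acc r hr
        rw [PySem.List.mem_pyRange_one] at hr
        rw [join_nil_eq_flatten, cells_eq_row symbol.toList _ r hr.1 hr.2]
        rw [← List.flatMap_def]
        rfl))) ?_)
  rw [PySem.List.foldl_append_singleton_eq_map, join_nil_eq_flatten, List.nil_append,
    ← List.flatMap_def]

-- ===== VERDICT (by name: the statement is the Claim_ definition above) =====
theorem draw_x_spec : Claim_equal_draw_x := by
  intro symbol size _
  show draw_x symbol size = draw_x_alt symbol size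
  rw [alt_eq]
  unfold draw_x
  simp only []
  rw [drawXPass_eq, drawXPass_eq, List.nil_append, ← List.flatMap_append]
  by_cases h : 0 ≤ size
  · rw [← PySem.List.pyRange_one_append 0 (size + 1) (size * 2 + 1) (by omega) (by omega)]
  · rw [PySem.List.pyRange_one_eq_nil (a := 0) (b := size + 1) (by omega),
      PySem.List.pyRange_one_eq_nil (a := size + 1) (b := size * 2 + 1) (by omega),
      PySem.List.pyRange_one_eq_nil (a := 0) (b := size * 2 + 1) (by omega)]
    simp
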